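-- pv_equiv track=rewrite | github.com/Mateusz-Dobrzynski/matura | sheets/2023-06/3 – anagram binarny.py | isAlmostBalanced
-- ===== SOURCE A (Python) =====
-- def isAlmostBalanced(number: str) -> bool:
--     zerosCount = 0
--     onesCount = 0
--     for digit in number:
--         if digit == "0":
--             zerosCount += 1
--         else:
--             onesCount += 1
--     if abs(zerosCount - onesCount) == 1:
--         return True
--     return False
-- ===== SOURCE B (Python) =====
-- def isAlmostBalanced(number: str) -> bool:
--     # Divide-and-conquer signed balance: each '0' contributes +1, any other
--     # character -1; the string is split in halves recursively (depth O(log n))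
--     # and the balances are added. Almost balanced iff |balance| == 1.
--     def balance(s: str) -> int:
--         if len(s) == 0:
--             return 0
--         if len(s) == 1:
--             return 1 if s == "0" else -1
--         m = len(s) // 2
--         return balance(s[:m]) + balance(s[m:])
--     return abs(balance(number)) == 1
-- ===== Notes on version B (the rewrite author's own statement) =====
-- stated objective: alternative
-- what changed: Replaces A's linear two-accumulator counting loop with a divide-and-conquer recursion that splits the string in halves and sums a signed balance (+1 per '0', -1 otherwise), testing |balance| == 1.
import Mathlib
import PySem

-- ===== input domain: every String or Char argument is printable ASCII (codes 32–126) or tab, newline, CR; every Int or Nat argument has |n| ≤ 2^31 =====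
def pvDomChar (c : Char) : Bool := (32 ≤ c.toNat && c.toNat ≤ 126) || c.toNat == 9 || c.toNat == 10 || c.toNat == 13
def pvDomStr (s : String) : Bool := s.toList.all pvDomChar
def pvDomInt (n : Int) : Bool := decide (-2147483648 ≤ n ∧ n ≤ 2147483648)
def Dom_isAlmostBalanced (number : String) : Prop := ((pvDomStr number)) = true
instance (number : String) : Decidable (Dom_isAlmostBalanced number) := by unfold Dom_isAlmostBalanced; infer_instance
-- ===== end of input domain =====

-- B replaces A's linear two-counter loop with a divide-and-conquer signed balance; same return value, no speed claim.
-- ===== PORT A =====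
-- A: a loop with two accumulators, then abs(zeros - ones) == 1.
def isAlmostBalanced (number : String) : Bool :=
  let p := number.toList.foldl
    (fun (acc : Int × Int) digit =>
      if digit = '0' then (acc.1 + 1, acc.2) else (acc.1, acc.2 + 1)) (0, 0)
  if |p.1 - p.2| = 1 then true else false

-- ===== PORT B =====
-- B's helper balance: split in halves, +1 per '0', -1 per other char.
def pvBalance (cs : List Char) : Int :=
  if cs.length = 0 then 0
  else if cs.length = 1 then (if cs = ['0'] then 1 else -1)
  else
    let m := cs.length / 2
    pvBalance (cs.take m) + pvBalance (cs.drop m)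
termination_by cs.length
decreasing_by
  · simp only [List.length_take]; omega
  · simp only [List.length_drop]; omega

def isAlmostBalanced_alt (number : String) : Bool :=
  decide (|pvBalance number.toList| = 1)

-- ===== PRECONDITION & SPEC =====
def Spec_isAlmostBalanced (number : String) (out : Bool) : Prop := out = isAlmostBalanced_alt number
instance (number : String) (out : Bool) : Decidable (Spec_isAlmostBalanced number out) := by unfold Spec_isAlmostBalanced; infer_instance

-- ===== CLAIM (what is proved, stated in full; the proofs are below) =====
def Claim_equal_isAlmostBalanced : Prop := ∀ (number : String), Dom_isAlmostBalanced number → Spec_isAlmostBalanced number (isAlmostBalanced number)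

-- ===== LEMMAS AND PROOFS =====

-- ===== VERDICT (by name: the statement is the Claim_ definition above) =====
-- balance = 2*zeros - length
theorem pvBalance_eq (cs : List Char) :
    pvBalance cs = 2 * (cs.count '0' : Int) - cs.length := by
  fun_induction pvBalance cs with
  | case1 cs h => simp at h; simp [h]
  | case2 _ _ => decide
  | case3 cs h1 h2 h3 =>
    match cs, h2, h3 with
    | [c], _, h3 =>
      have hc : c ≠ '0' := by intro h; exact h3 (by simp [h])
      simp [hc]
  | case4 cs h1 h2 m ih1 ih2 =>
    have hsplit : cs.take m ++ cs.drop m = cs := List.take_append_drop _ _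
    have hc : (cs.take m).count '0' + (cs.drop m).count '0'
        = cs.count '0' := by rw [← List.count_append, hsplit]
    have hl : (cs.take m).length + (cs.drop m).length
        = cs.length := by rw [← List.length_append, hsplit]
    simp only [ih1, ih2]
    push_cast [← hc, ← hl]
    ring

-- A's pair loop computes (z + #zeros, o + #non-zeros).
theorem pvPairLoop (cs : List Char) (z o : Int) :
    cs.foldl
      (fun (acc : Int × Int) digit =>
        if digit = '0' then (acc.1 + 1, acc.2) else (acc.1, acc.2 + 1)) (z, o)
    = (z + (cs.count '0' : Int), o + ((cs.length : Int) - (cs.count '0' : Int))) := by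
  induction cs generalizing z o with
  | nil => simp
  | cons h t ih =>
    by_cases hc : h = '0'
    · subst hc
      simp only [List.foldl_cons, ih, List.count_cons_self, List.length_cons, Prod.mk.injEq]
      constructor <;> push_cast <;> ring
    · simp only [List.foldl_cons, if_neg hc, ih, List.length_cons, Prod.mk.injEq,
        List.count_cons]
      simp only [beq_iff_eq, hc, if_false]
      constructor <;> push_cast <;> ring

theorem isAlmostBalanced_spec : Claim_equal_isAlmostBalanced := by
  intro number _
  unfold Spec_isAlmostBalanced isAlmostBalanced isAlmostBalanced_alt
  rw [pvPairLoop, pvBalance_eq]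
  set z : Int := (number.toList.count '0' : Int)
  set n : Int := (number.toList.length : Int)
  have h : (0 : Int) + z - (0 + (n - z)) = 2 * z - n := by ring
  simp only [h]
  by_cases hb : |2 * z - n| = 1 <;> simp [hb]
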